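-- pv_equiv track=rewrite | github.com/brendan-banfield/Maximum-Clique-Comps | algorithms/branch_and_bound.py | get_max_color
-- ===== SOURCE A (Python) =====
-- def get_max_color(C, R):
--     max_color = -1
--     max_color_node = None
--     color = -1
--
--     # Loop over the nodes in R to find the one with the highest color
--     for node in R:
--
--         # Check the color of the node (node corresponds to an index in R)
--         for color_index, color_list in enumerate(C):
--             if node in color_list:
--                 color = color_index
--
--             # Update max_color and max_color_node if needed
--             if color > max_color:
--                 max_color = color
--                 max_color_node = node
--
--     return max_color_node, max_color
-- ===== SOURCE B (Python) =====
-- def get_max_color(C, R):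
--     # Scan colors from highest to lowest; the first color class that
--     # intersects R gives the answer, taking the first such node in R's order.
--     for i in range(len(C) - 1, -1, -1):
--         ci = set(C[i])
--         for node in R:
--             if node in ci:
--                 return node, i
--     return None, -1
-- ===== Notes on version B (the rewrite author's own statement) =====
-- stated objective: faster
-- what changed: Instead of computing every node's color via a full scan of all color lists per node with carried loop state, B walks the color classes from the highest index down and returns at the first class that intersects R (membership via a set), taking R's first member of that class.
import Mathlib
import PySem

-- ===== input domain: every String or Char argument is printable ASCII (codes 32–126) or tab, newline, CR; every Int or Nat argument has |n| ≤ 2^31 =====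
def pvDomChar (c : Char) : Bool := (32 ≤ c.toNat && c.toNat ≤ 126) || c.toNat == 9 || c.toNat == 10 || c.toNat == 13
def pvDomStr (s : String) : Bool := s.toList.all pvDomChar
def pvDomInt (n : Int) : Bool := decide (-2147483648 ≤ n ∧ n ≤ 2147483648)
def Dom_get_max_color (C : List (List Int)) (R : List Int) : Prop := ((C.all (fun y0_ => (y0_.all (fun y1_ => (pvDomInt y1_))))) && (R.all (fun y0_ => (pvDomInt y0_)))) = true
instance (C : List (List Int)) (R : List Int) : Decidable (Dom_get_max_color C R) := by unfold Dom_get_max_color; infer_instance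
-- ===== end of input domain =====

-- B scans the color classes from the highest index down and returns at the first class
-- intersecting R (first such node in R's order), instead of A's per-node scan of every
-- color list with carried loop state; objective: faster (early exit, set membership).

-- ===== PORT A =====
def get_max_color (C : List (List Int)) (R : List Int) : Option Int × Int :=
  let st :=
    R.foldl (fun (st : Int × Option Int × Int) node =>
      (PySem.List.enumerate C 0).foldl (fun (st : Int × Option Int × Int) p =>
        let color : Int := if node ∈ p.2 then p.1 else st.2.2
        if color > st.1 then (color, some node, color) else (st.1, st.2.1, color))
        st)
      (-1, none, -1)
  (st.2.1, st.1)

-- ===== PORT B =====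
-- inner loop: 'for node in R: if node in ci: return node, i'
def pvFindNode (ci : PySem.Set Int) : List Int → Option Int
  | [] => none
  | node :: rest => if ci.contains node then some node else pvFindNode ci rest

-- outer loop over range(len(C)-1, -1, -1); every i produced is in range, so C[i] is pyGetD
def pvColorLoop (C : List (List Int)) (R : List Int) : List Int → Option Int × Int
  | [] => (none, -1)
  | i :: rest =>
    let ci := PySem.Set.ofList (PySem.List.pyGetD C i [])
    match pvFindNode ci R with
    | some node => (some node, i)
    | none => pvColorLoop C R rest

def get_max_color_alt (C : List (List Int)) (R : List Int) : Option Int × Int :=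
  pvColorLoop C R (PySem.List.pyRange ((C.length : Int) - 1) (-1) (-1))

-- ===== PRECONDITION & SPEC =====
def Spec_get_max_color (C : List (List Int)) (R : List Int) (out : Option Int × Int) : Prop := out = get_max_color_alt C R
instance (C : List (List Int)) (R : List Int) (out : Option Int × Int) : Decidable (Spec_get_max_color C R out) := by unfold Spec_get_max_color; infer_instance

-- ===== CLAIM (what is proved, stated in full; the proofs are below) =====
def Claim_equal_get_max_color : Prop := ∀ (C : List (List Int)) (R : List Int), Dom_get_max_color C R → Spec_get_max_color C R (get_max_color C R)

-- ===== LEMMAS AND PROOFS =====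

-- 'last color index containing node' fold (A's inner colour update), from start value c
def pvG (node : Int) (E : List (Int × List Int)) (c : Int) : Int :=
  E.foldl (fun a p => if node ∈ p.2 then p.1 else a) c

-- node's colour under the first k colour classes (-1 if uncoloured among them)
def pvMc (C : List (List Int)) (k : Nat) (node : Int) : Int :=
  pvG node (PySem.List.enumerate (C.take k) 0) (-1)

-- running maximum of f over R, from m
def pvMsup (f : Int → Int) (R : List Int) (m : Int) : Int :=
  R.foldl (fun a x => max a (f x)) m

theorem pvG_cases (node : Int) (E : List (Int × List Int)) (c : Int) :
    pvG node E c = c ∨ ∃ p ∈ E, node ∈ p.2 ∧ pvG node E c = p.1 := by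
  induction E generalizing c with
  | nil => exact Or.inl rfl
  | cons p E ih =>
    by_cases h : node ∈ p.2
    · have hG : pvG node (p :: E) c = pvG node E p.1 := by simp [pvG, h]
      rcases ih p.1 with h' | ⟨q, hq, hnq, hval⟩
      · exact Or.inr ⟨p, by simp, h, by rw [hG, h']⟩
      · exact Or.inr ⟨q, by simp [hq], hnq, by rw [hG, hval]⟩
    · have hG : pvG node (p :: E) c = pvG node E c := by simp [pvG, h]
      rcases ih c with h' | ⟨q, hq, hnq, hval⟩
      · exact Or.inl (by rw [hG, h'])
      · exact Or.inr ⟨q, by simp [hq], hnq, by rw [hG, hval]⟩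

theorem pvG_start (node : Int) (E : List (Int × List Int)) (c d : Int) :
    pvG node E c = pvG node E d ∨ (pvG node E c = c ∧ pvG node E d = d) := by
  induction E generalizing c d with
  | nil => exact Or.inr ⟨rfl, rfl⟩
  | cons p E ih =>
    by_cases h : node ∈ p.2
    · left; simp [pvG, h]
    · have h1 : pvG node (p :: E) c = pvG node E c := by simp [pvG, h]
      have h2 : pvG node (p :: E) d = pvG node E d := by simp [pvG, h]
      rw [h1, h2]; exact ih c d

theorem pvG_le (node : Int) (E : List (Int × List Int)) (a : Int)
    (h : ∀ q ∈ E, a ≤ q.1) : a ≤ pvG node E a := by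
  rcases pvG_cases node E a with h' | ⟨p, hp, _, hval⟩
  · omega
  · rw [hval]; exact h p hp

-- A's inner loop over the enumerated colour classes, characterised
theorem pvInner_eq (node : Int) (E : List (Int × List Int))
    (hE : E.Pairwise (fun p q => p.1 < q.1)) :
    ∀ (m c : Int) (nd : Option Int), c ≤ m →
    E.foldl (fun (st : Int × Option Int × Int) p =>
        if (if node ∈ p.2 then p.1 else st.2.2) > st.1
        then ((if node ∈ p.2 then p.1 else st.2.2), some node,
              (if node ∈ p.2 then p.1 else st.2.2))
        else (st.1, st.2.1, (if node ∈ p.2 then p.1 else st.2.2))) (m, nd, c)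
      = (max m (pvG node E c), if m < pvG node E c then some node else nd, pvG node E c) := by
  induction E with
  | nil =>
    intro m c nd hcm
    simp only [pvG, List.foldl_nil]
    rw [max_eq_left hcm, if_neg (by omega)]
  | cons p E ih =>
    intro m c nd hcm
    rw [List.pairwise_cons] at hE
    have hE2 := hE.2
    have hhead := hE.1
    simp only [List.foldl_cons]
    by_cases h : node ∈ p.2
    · simp only [if_pos h]
      have hG : pvG node (p :: E) c = pvG node E p.1 := by simp [pvG, h]
      have hple : p.1 ≤ pvG node E p.1 :=
        pvG_le node E p.1 (fun q hq => le_of_lt (hhead q hq))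
      rw [hG]
      by_cases hpm : p.1 > m
      · rw [if_pos hpm, ih hE2 p.1 p.1 (some node) le_rfl, ite_self,
            max_eq_right hple, max_eq_right (le_trans (le_of_lt hpm) hple),
            if_pos (lt_of_lt_of_le hpm hple)]
      · rw [if_neg hpm, ih hE2 m p.1 nd (by omega)]
    · simp only [if_neg h]
      have hG : pvG node (p :: E) c = pvG node E c := by simp [pvG, h]
      rw [hG, if_neg (by omega), ih hE2 m c nd hcm]

theorem pvMsup_init_le (f : Int → Int) (R : List Int) (m : Int) : m ≤ pvMsup f R m := by
  induction R generalizing m with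
  | nil => exact le_rfl
  | cons x R ih =>
    simp only [pvMsup, List.foldl_cons] at *
    exact le_trans (le_max_left m (f x)) (ih (max m (f x)))

theorem pvMsup_mem_le (f : Int → Int) (R : List Int) (m : Int) (x : Int) (hx : x ∈ R) :
    f x ≤ pvMsup f R m := by
  induction R generalizing m with
  | nil => cases hx
  | cons y R ih =>
    simp only [pvMsup, List.foldl_cons] at *
    rcases List.mem_cons.mp hx with h | h
    · subst h
      exact le_trans (le_max_right m (f x)) (pvMsup_init_le f R _)
    · exact ih _ h

theorem pvMsup_le (f : Int → Int) (R : List Int) (m c : Int)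
    (hm : m ≤ c) (h : ∀ x ∈ R, f x ≤ c) : pvMsup f R m ≤ c := by
  induction R generalizing m with
  | nil => exact hm
  | cons x R ih =>
    simp only [pvMsup, List.foldl_cons] at *
    exact ih _ (max_le hm (h x (List.mem_cons_self))) (fun y hy => h y (List.mem_cons_of_mem _ hy))

theorem pvMsup_congr (f f' : Int → Int) (R : List Int) (m : Int)
    (h : ∀ x ∈ R, f x = f' x) : pvMsup f R m = pvMsup f' R m := by
  induction R generalizing m with
  | nil => rfl
  | cons x R ih =>
    simp only [pvMsup, List.foldl_cons] at *
    rw [h x (List.mem_cons_self)]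
    exact ih _ (fun y hy => h y (List.mem_cons_of_mem _ hy))

theorem pvFind?_congr (p q : Int → Bool) (R : List Int)
    (h : ∀ x ∈ R, p x = q x) : R.find? p = R.find? q := by
  induction R with
  | nil => rfl
  | cons x R ih =>
    rw [List.find?_cons, List.find?_cons, h x (List.mem_cons_self)]
    cases hq : q x
    · exact ih (fun y hy => h y (List.mem_cons_of_mem _ hy))
    · rfl

-- the strict-improvement argmax fold, characterised
theorem pvFold2_char (f : Int → Int) (R : List Int) :
    ∀ (m : Int) (nd : Option Int),
    R.foldl (fun (st : Int × Option Int) x => if f x > st.1 then (f x, some x) else st) (m, nd)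
      = (pvMsup f R m,
         if m < pvMsup f R m then R.find? (fun x => decide (pvMsup f R m ≤ f x)) else nd) := by
  induction R with
  | nil =>
    intro m nd
    simp only [pvMsup, List.foldl_nil, List.find?_nil]
    rw [if_neg (by omega)]
  | cons x R ih =>
    intro m nd
    have hM : pvMsup f (x :: R) m = pvMsup f R (max m (f x)) := rfl
    simp only [List.foldl_cons]
    by_cases h : f x > m
    · have hS : pvMsup f (x :: R) m = pvMsup f R (f x) := by
        rw [hM, max_eq_right (le_of_lt h)]
      have hfx : f x ≤ pvMsup f R (f x) := pvMsup_init_le f R (f x)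
      rw [if_pos h, ih (f x) (some x), hS, List.find?_cons]
      by_cases himp : f x < pvMsup f R (f x)
      · have hd : (decide (pvMsup f R (f x) ≤ f x)) = false := by
          simp only [decide_eq_false_iff_not]; omega
        rw [if_pos himp, hd, if_pos (show m < pvMsup f R (f x) by omega)]
      · have hd : (decide (pvMsup f R (f x) ≤ f x)) = true := by
          simp only [decide_eq_true_eq]; omega
        rw [if_neg himp, hd, if_pos (show m < pvMsup f R (f x) by omega)]
    · have hS : pvMsup f (x :: R) m = pvMsup f R m := by
        rw [hM, max_eq_left (by omega)]
      rw [if_neg h, ih m nd, hS]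
      by_cases himp : m < pvMsup f R m
      · have hd : (decide (pvMsup f R m ≤ f x)) = false := by
          simp only [decide_eq_false_iff_not]; omega
        rw [if_pos himp, if_pos himp, List.find?_cons, hd]
      · rw [if_neg himp, if_neg himp]

theorem pvFold2_congr (f f' : Int → Int) (R : List Int) (m : Int) (nd : Option Int)
    (h : ∀ x ∈ R, f x = f' x) :
    R.foldl (fun (st : Int × Option Int) x => if f x > st.1 then (f x, some x) else st) (m, nd)
      = R.foldl (fun (st : Int × Option Int) x => if f' x > st.1 then (f' x, some x) else st) (m, nd) := by
  rw [pvFold2_char f R m nd, pvFold2_char f' R m nd, pvMsup_congr f f' R m h]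
  congr 1
  split_ifs with h1
  · exact pvFind?_congr _ _ R (fun x hx => by rw [h x hx])
  · rfl

-- bounds on pvMc
theorem pvMc_lt (C : List (List Int)) (k : Nat) (x : Int) :
    pvMc C k x < (k : Int) ∨ pvMc C k x = -1 := by
  rcases pvG_cases x (PySem.List.enumerate (C.take k) 0) (-1) with h | ⟨p, hp, _, hval⟩
  · exact Or.inr h
  · left
    simp only [pvMc]
    rw [hval]
    rcases (PySem.List.mem_enumerate_iff _ _ _).mp hp with ⟨j, hj, hpj⟩
    have hjk : j < k := lt_of_lt_of_le hj (List.length_take_le ..)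
    rw [hpj]
    simp only [zero_add]
    exact_mod_cast hjk

theorem pvMc_succ (C : List (List Int)) (k : Nat) (hk : k < C.length) (x : Int) :
    pvMc C (k + 1) x = if x ∈ C[k] then (k : Int) else pvMc C k x := by
  have htake : C.take (k + 1) = C.take k ++ [C[k]] := by
    rw [List.take_add_one, List.getElem?_eq_getElem hk]
    rfl
  have hlen : (C.take k).length = k := by
    rw [List.length_take]; omega
  have henum : PySem.List.enumerate (C.take (k + 1)) 0
      = PySem.List.enumerate (C.take k) 0 ++ [((k : Int), C[k])] := by
    rw [htake, PySem.List.enumerate_append, hlen]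
    simp [PySem.List.enumerate_cons, PySem.List.enumerate_nil]
  simp only [pvMc]
  rw [henum]
  simp only [pvG, List.foldl_append, List.foldl_cons, List.foldl_nil]

theorem pvMc_ge_iff (C : List (List Int)) (k : Nat) (hk : k < C.length) (x : Int) :
    (k : Int) ≤ pvMc C (k + 1) x ↔ x ∈ C[k] := by
  constructor
  · intro h
    rw [pvMc_succ C k hk x] at h
    by_cases hm : x ∈ C[k]
    · exact hm
    · rw [if_neg hm] at h
      exfalso
      rcases pvMc_lt C k x with h' | h' <;> omega
  · intro h
    rw [pvMc_succ C k hk x, if_pos h]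

theorem pvMc_zero (C : List (List Int)) (x : Int) : pvMc C 0 x = -1 := rfl

-- A's outer loop equals the strict-improvement argmax fold over R with key pvMc C C.length
theorem pvOuter (C : List (List Int)) (R : List Int) :
    ∀ (m c : Int) (nd : Option Int), -1 ≤ m → c ≤ m →
    (R.foldl (fun (st : Int × Option Int × Int) node =>
        (PySem.List.enumerate C 0).foldl (fun (st : Int × Option Int × Int) p =>
          if (if node ∈ p.2 then p.1 else st.2.2) > st.1
          then ((if node ∈ p.2 then p.1 else st.2.2), some node,
                (if node ∈ p.2 then p.1 else st.2.2))
          else (st.1, st.2.1, (if node ∈ p.2 then p.1 else st.2.2))) st)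
      (m, nd, c)).1
      = (R.foldl (fun (st : Int × Option Int) x =>
          if pvMc C C.length x > st.1 then (pvMc C C.length x, some x) else st) (m, nd)).1
    ∧ (R.foldl (fun (st : Int × Option Int × Int) node =>
        (PySem.List.enumerate C 0).foldl (fun (st : Int × Option Int × Int) p =>
          if (if node ∈ p.2 then p.1 else st.2.2) > st.1
          then ((if node ∈ p.2 then p.1 else st.2.2), some node,
                (if node ∈ p.2 then p.1 else st.2.2))
          else (st.1, st.2.1, (if node ∈ p.2 then p.1 else st.2.2))) st)
      (m, nd, c)).2.1
      = (R.foldl (fun (st : Int × Option Int) x =>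
          if pvMc C C.length x > st.1 then (pvMc C C.length x, some x) else st) (m, nd)).2 := by
  induction R with
  | nil => intro m c nd _ _; exact ⟨rfl, rfl⟩
  | cons node R ih =>
    intro m c nd hm hcm
    have hpair : (PySem.List.enumerate C 0).Pairwise (fun p q => p.1 < q.1) :=
      PySem.List.pairwise_lt_enumerate ..
    have hmc : pvMc C C.length node = pvG node (PySem.List.enumerate C 0) (-1) := by
      simp only [pvMc]
      rw [List.take_length]
    simp only [List.foldl_cons]
    rw [pvInner_eq node (PySem.List.enumerate C 0) hpair m c nd hcm]
    rcases pvG_start node (PySem.List.enumerate C 0) c (-1) with heq | ⟨hc, hneg⟩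
    · -- carried start irrelevant: pvG … c = pvG … (-1) = the node's colour
      rw [heq, ← hmc]
      by_cases h : pvMc C C.length node > m
      · rw [max_eq_right (le_of_lt h), if_pos h, if_pos h]
        exact ih (pvMc C C.length node) (pvMc C C.length node) (some node) (by omega) le_rfl
      · rw [max_eq_left (by omega), if_neg (by omega), if_neg h]
        exact ih m (pvMc C C.length node) nd hm (by omega)
    · -- node uncoloured among all classes: carried colour c ≤ m, key is -1 ≤ m
      rw [hc]
      rw [hneg] at hmc
      rw [max_eq_left hcm, if_neg (by omega), hmc, if_neg (by omega)]
      exact ih m c nd hm hcm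

theorem pvFindNode_eq_find? (ci : PySem.Set Int) (R : List Int) :
    pvFindNode ci R = R.find? (fun x => ci.contains x) := by
  induction R with
  | nil => rfl
  | cons x R ih =>
    rw [List.find?_cons]
    cases h : ci.contains x
    · simp only [pvFindNode, h, Bool.false_eq_true, if_neg, not_false_iff]
      exact ih
    · simp only [pvFindNode, h, if_pos]

theorem pvContains_iff_mc (C : List (List Int)) (k : Nat) (hk : k < C.length) (x : Int) :
    (PySem.Set.ofList C[k]).contains x = decide ((k : Int) ≤ pvMc C (k + 1) x) := by
  have h : (PySem.Set.ofList C[k]).contains x = true ↔ ((k : Int) ≤ pvMc C (k + 1) x) := by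
    rw [PySem.Set.contains_iff, PySem.Set.mem_ofList, pvMc_ge_iff C k hk x]
  cases hd : decide ((k : Int) ≤ pvMc C (k + 1) x)
  · simp only [decide_eq_false_iff_not] at hd
    cases hc : (PySem.Set.ofList C[k]).contains x
    · rfl
    · exact absurd (h.mp hc) hd
  · simp only [decide_eq_true_eq] at hd
    exact h.mpr hd

-- B's descending scan of the first k colour classes equals the argmax fold with key pvMc C k
theorem pvBLoop (C : List (List Int)) (R : List Int) :
    ∀ (k : Nat), k ≤ C.length →
    pvColorLoop C R (PySem.List.pyRange ((k : Int) - 1) (-1) (-1))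
      = ((R.foldl (fun (st : Int × Option Int) x =>
            if pvMc C k x > st.1 then (pvMc C k x, some x) else st) (-1, none)).2,
         (R.foldl (fun (st : Int × Option Int) x =>
            if pvMc C k x > st.1 then (pvMc C k x, some x) else st) (-1, none)).1) := by
  intro k
  induction k with
  | zero =>
    intro _
    rw [show ((0 : Nat) : Int) - 1 = -1 by norm_num,
        PySem.List.pyRange_neg_one_eq_nil (by omega)]
    rw [pvFold2_char (pvMc C 0) R (-1) none]
    have hsup : pvMsup (pvMc C 0) R (-1) = -1 :=
      le_antisymm (pvMsup_le _ R _ _ le_rfl (fun x _ => by rw [pvMc_zero]))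
        (pvMsup_init_le _ R _)
    rw [hsup, if_neg (by omega)]
    rfl
  | succ k ih =>
    intro hk1
    have hk : k < C.length := by omega
    have hrange : PySem.List.pyRange (((k + 1 : Nat) : Int) - 1) (-1) (-1)
        = (k : Int) :: PySem.List.pyRange ((k : Int) - 1) (-1) (-1) := by
      have hc : (((k + 1 : Nat) : Int) - 1) = (k : Int) := by push_cast; ring
      rw [hc, PySem.List.pyRange_neg_one_cons (by omega)]
    rw [hrange]
    simp only [pvColorLoop]
    have hget : PySem.List.pyGetD C ((k : Nat) : Int) [] = C[k] := by
      rw [PySem.List.pyGetD_natCast]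
      exact List.getD_eq_getElem C [] hk
    rw [hget, pvFindNode_eq_find?,
        pvFind?_congr _ (fun x => decide ((k : Int) ≤ pvMc C (k + 1) x)) R
          (fun x _ => pvContains_iff_mc C k hk x)]
    cases hfind : R.find? (fun x => decide ((k : Int) ≤ pvMc C (k + 1) x)) with
    | none =>
      -- no node of R is in C[k]: the (k+1)-key agrees with the k-key on R
      have hagree : ∀ x ∈ R, pvMc C (k + 1) x = pvMc C k x := by
        intro x hx
        have hnk := List.find?_eq_none.mp hfind x hx
        simp only [decide_eq_true_eq] at hnk
        rw [pvMc_succ C k hk x, if_neg (fun hmem => hnk ((pvMc_ge_iff C k hk x).mpr hmem))]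
      rw [ih (by omega), pvFold2_congr (pvMc C (k + 1)) (pvMc C k) R (-1) none hagree]
    | some node0 =>
      have hmem : node0 ∈ R := List.mem_of_find?_eq_some hfind
      have hpred : (k : Int) ≤ pvMc C (k + 1) node0 := by
        have hp := List.find?_some hfind
        simpa using hp
      have hsup : pvMsup (pvMc C (k + 1)) R (-1) = (k : Int) := by
        apply le_antisymm
        · refine pvMsup_le _ R _ _ (by omega) (fun x _ => ?_)
          rcases pvMc_lt C (k + 1) x with h' | h' <;> push_cast at h' ⊢ <;> omega
        · exact le_trans hpred (pvMsup_mem_le _ R _ _ hmem)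
      rw [pvFold2_char (pvMc C (k + 1)) R (-1) none, hsup, if_pos (by omega), hfind]

-- ===== VERDICT (by name: the statement is the Claim_ definition above) =====
theorem get_max_color_spec : Claim_equal_get_max_color := by
  intro C R _
  show get_max_color C R = get_max_color_alt C R
  have hA := pvOuter C R (-1) (-1) none le_rfl le_rfl
  have hB := pvBLoop C R C.length le_rfl
  simp only [get_max_color, get_max_color_alt]
  rw [hB, Prod.mk.injEq]
  exact ⟨hA.2, hA.1⟩
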